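-- pv_equiv track=rewrite | github.com/arindhimar/BluePineapple | Python Programs/28-01-26/274.py | sum_of_even_index_binomial_coefficients
-- ===== SOURCE A (Python) =====
-- def sum_of_even_index_binomial_coefficients(n):
--     if n < 0:
--         raise ValueError("Input must be a non-negative integer")
--
--     from math import comb
--
--     temp_sum = 0
--     for k in range(0, n + 1, 2):
--         temp_sum += comb(n, k)
--
--     return temp_sum
-- ===== SOURCE B (Python) =====
-- def sum_of_even_index_binomial_coefficients(n):
--     if n < 0:
--         raise ValueError("Input must be a non-negative integer")
--     return 1 if n == 0 else 2 ** (n - 1)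
-- ===== Notes on version B (the rewrite author's own statement) =====
-- stated objective: faster
-- what changed: Replaces the loop summing comb(n,k) over even k by the closed form 2^(n-1) (1 for n=0).
import Mathlib
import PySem

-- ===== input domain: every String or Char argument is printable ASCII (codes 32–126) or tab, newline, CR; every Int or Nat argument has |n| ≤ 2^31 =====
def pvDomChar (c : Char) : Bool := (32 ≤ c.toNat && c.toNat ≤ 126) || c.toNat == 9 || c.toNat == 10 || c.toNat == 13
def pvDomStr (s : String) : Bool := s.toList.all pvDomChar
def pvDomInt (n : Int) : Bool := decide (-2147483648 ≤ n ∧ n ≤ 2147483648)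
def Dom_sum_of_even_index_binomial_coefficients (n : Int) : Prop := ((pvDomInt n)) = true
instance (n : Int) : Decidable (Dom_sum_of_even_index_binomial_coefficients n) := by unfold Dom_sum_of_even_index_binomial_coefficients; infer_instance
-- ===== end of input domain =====

-- ===== PORT A =====
-- A: loop over range(0, n+1, 2) summing comb(n, k); raises ValueError for n < 0
-- (excluded by Pre_; the guard value 0 is unreachable under Pre_).
def sum_of_even_index_binomial_coefficients (n : Int) : Int :=
  if n < 0 then 0
  else
    (PySem.List.pyRange 0 (n + 1) 2).foldl
      (fun temp_sum k => temp_sum + (Nat.choose n.toNat k.toNat : Int)) 0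

-- ===== PORT B =====
-- B: closed form 2^(n-1) for n >= 1, 1 for n = 0; raises for n < 0 (excluded by Pre_).
def sum_of_even_index_binomial_coefficients_alt (n : Int) : Int :=
  if n < 0 then 0
  else if n = 0 then 1 else 2 ^ (n - 1).toNat

-- ===== PRECONDITION & SPEC =====
-- Pre_: both programs raise ValueError on n < 0.
def Pre_sum_of_even_index_binomial_coefficients (n : Int) : Prop := 0 ≤ n
instance (n : Int) : Decidable (Pre_sum_of_even_index_binomial_coefficients n) := by
  unfold Pre_sum_of_even_index_binomial_coefficients; infer_instance
def pvWitness_sum_of_even_index_binomial_coefficients : Int := 6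
def Spec_sum_of_even_index_binomial_coefficients (n : Int) (out : Int) : Prop := out = sum_of_even_index_binomial_coefficients_alt n
instance (n : Int) (out : Int) : Decidable (Spec_sum_of_even_index_binomial_coefficients n out) := by unfold Spec_sum_of_even_index_binomial_coefficients; infer_instance

-- ===== CLAIM (what is proved, stated in full; the proofs are below) =====
def Claim_equal_sum_of_even_index_binomial_coefficients : Prop := ∀ (n : Int), Dom_sum_of_even_index_binomial_coefficients n → Pre_sum_of_even_index_binomial_coefficients n → Spec_sum_of_even_index_binomial_coefficients n (sum_of_even_index_binomial_coefficients n)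

-- ===== LEMMAS AND PROOFS =====

theorem pv_sum_map_range (f : ℕ → Int) (c : ℕ) :
    ((List.range c).map f).sum = ∑ j ∈ Finset.range c, f j := by
  induction c with
  | zero => simp
  | succ c ih => simp [List.range_succ, Finset.sum_range_succ, ih]

theorem pv_filter_even (m : ℕ) :
    (Finset.range (m + 1)).filter (fun k => Even k)
      = (Finset.range (m / 2 + 1)).image (fun j => 2 * j) := by
  ext k
  simp only [Finset.mem_filter, Finset.mem_range, Finset.mem_image, Nat.even_iff]
  constructor
  · rintro ⟨hk, he⟩; exact ⟨k / 2, by omega, by omega⟩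
  · rintro ⟨j, hj, rfl⟩; omega

theorem pv_even_sum (m : ℕ) :
    (∑ j ∈ Finset.range (m / 2 + 1), (m.choose (2 * j) : Int))
      = if m = 0 then 1 else 2 ^ (m - 1) := by
  have himg : (∑ j ∈ Finset.range (m / 2 + 1), (m.choose (2 * j) : Int))
      = ∑ k ∈ (Finset.range (m + 1)).filter (fun k => Even k), (m.choose k : Int) := by
    rw [pv_filter_even, Finset.sum_image (by intro a _ b _ h; simp only at h; omega)]
  have hE : (∑ j ∈ Finset.range (m / 2 + 1), (m.choose (2 * j) : Int))
      = ∑ k ∈ Finset.range (m + 1), (if Even k then (m.choose k : Int) else 0) := by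
    rw [himg, Finset.sum_filter]
  have halt : ∑ k ∈ Finset.range (m + 1), ((-1 : Int) ^ k * m.choose k)
      = if m = 0 then 1 else 0 := Int.alternating_sum_range_choose
  have htot : ∑ k ∈ Finset.range (m + 1), (m.choose k : Int) = 2 ^ m := by
    have := Nat.sum_range_choose m
    exact_mod_cast congrArg (Nat.cast : ℕ → Int) this
  have hdouble : 2 * (∑ k ∈ Finset.range (m + 1), (if Even k then (m.choose k : Int) else 0))
      = (if m = 0 then 1 else 0) + 2 ^ m := by
    rw [Finset.mul_sum, ← halt, ← htot, ← Finset.sum_add_distrib]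
    refine Finset.sum_congr rfl (fun k _ => ?_)
    by_cases hk : Even k
    · rw [if_pos hk, hk.neg_one_pow]; ring
    · rw [if_neg hk, (Nat.not_even_iff_odd.mp hk).neg_one_pow]; ring
  have h2 : (2 : Int) ≠ 0 := by norm_num
  rcases Nat.eq_zero_or_pos m with hm | hm
  · subst hm; simp
  · have hrw : (if m = 0 then (1 : Int) else 0) + 2 ^ m = 2 * 2 ^ (m - 1) := by
      rw [if_neg (Nat.pos_iff_ne_zero.mp hm), zero_add]
      conv_lhs => rw [show m = (m - 1) + 1 by omega]
      rw [pow_succ']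
    rw [hE, if_neg (Nat.pos_iff_ne_zero.mp hm)]
    exact mul_left_cancel₀ h2 (by rw [hdouble, hrw])

-- ===== VERDICT (by name: the statement is the Claim_ definition above) =====
theorem sum_of_even_index_binomial_coefficients_spec : Claim_equal_sum_of_even_index_binomial_coefficients := by
  intro n _ hpre
  unfold Spec_sum_of_even_index_binomial_coefficients
  unfold Pre_sum_of_even_index_binomial_coefficients at hpre
  obtain ⟨m, rfl⟩ := Int.eq_ofNat_of_zero_le hpre
  unfold sum_of_even_index_binomial_coefficients sum_of_even_index_binomial_coefficients_alt
  rw [if_neg (by omega), if_neg (by omega)]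
  rw [PySem.List.pyRange_of_pos 0 ((m : Int) + 1) (by norm_num)]
  rw [if_pos (by omega)]
  have hcount : (((m : Int) + 1 - 0 + 2 - 1) / 2).toNat = m / 2 + 1 := by omega
  rw [hcount]
  rw [List.foldl_map, PySem.List.foldl_add, pv_sum_map_range]
  have hbody : ∀ j ∈ Finset.range (m / 2 + 1),
      ((m : Int).toNat.choose ((0 + 2 * (j : Int)).toNat) : Int) = (m.choose (2 * j) : Int) := by
    intro j _
    have h1 : ((0 : Int) + 2 * (j : Int)).toNat = 2 * j := by omega
    have h2 : ((m : Int)).toNat = m := by omega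
    rw [h1, h2]
  rw [zero_add, Finset.sum_congr rfl hbody, pv_even_sum]
  by_cases hm : m = 0
  · subst hm; simp
  · rw [if_neg hm, if_neg (by exact_mod_cast hm)]
    congr 1; omega
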